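-- pv_equiv track=rewrite | github.com/Aarmartin/Quarto-AI | qutil.py | comparePieces
-- ===== SOURCE A (Python) =====
-- def compare(b1:int ,b2:int):
-- 	return ~(b1^b2) & 0b1111
--
-- def comparePieces(bs: list[int]):
-- 	if len(bs) == 0: return 0b0000
-- 	p = bs[0]
-- 	s = 0b1111
-- 	for b in bs[1:]:
-- 		s &= compare(p,b)
-- 		p = b
-- 	return s
-- ===== SOURCE B (Python) =====
-- def comparePieces(bs: list[int]):
-- 	if len(bs) == 0: return 0b0000
-- 	a = o = bs[0]
-- 	for b in bs[1:]:
-- 		a &= b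
-- 		o |= b
-- 	return ~(a ^ o) & 0b1111
-- ===== Notes on version B (the rewrite author's own statement) =====
-- stated objective: alternative
-- what changed: B replaces A's previous-element tracking with per-pair equality masks by two aggregate registers (cumulative AND and OR of all elements) combined once at the end via ~(a^o)&0b1111, since a bit is common to all elements iff AND and OR agree on it.
import Mathlib
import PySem

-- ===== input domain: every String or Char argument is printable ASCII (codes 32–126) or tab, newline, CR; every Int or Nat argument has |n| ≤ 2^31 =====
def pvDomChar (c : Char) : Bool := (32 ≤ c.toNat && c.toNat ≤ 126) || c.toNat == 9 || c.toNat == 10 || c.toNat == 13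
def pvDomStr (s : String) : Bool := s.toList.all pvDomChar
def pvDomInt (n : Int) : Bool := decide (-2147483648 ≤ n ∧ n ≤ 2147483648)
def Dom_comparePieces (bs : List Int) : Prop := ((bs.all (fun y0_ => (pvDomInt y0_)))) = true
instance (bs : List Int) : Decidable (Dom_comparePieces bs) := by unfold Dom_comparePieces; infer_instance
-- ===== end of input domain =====

-- B replaces A's per-pair equality masks with cumulative AND/OR registers combined once at the end; objective: alternative (same cost, different state).

-- ===== PORT A =====
def pvCompare (b1 b2 : Int) : Int :=
  PySem.Int.band (Int.not (PySem.Int.bxor b1 b2)) 15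

def comparePieces (bs : List Int) : Int :=
  match bs with
  | [] => 0
  | p :: _ =>
    ((PySem.List.slice bs (some 1) none).foldl
      (fun (sp : Int × Int) b => (PySem.Int.band sp.1 (pvCompare sp.2 b), b)) (15, p)).1

-- ===== PORT B =====
def comparePieces_alt (bs : List Int) : Int :=
  match bs with
  | [] => 0
  | h :: _ =>
    let ao := (PySem.List.slice bs (some 1) none).foldl
      (fun (ao : Int × Int) b => (PySem.Int.band ao.1 b, PySem.Int.bor ao.2 b)) (h, h)
    PySem.Int.band (Int.not (PySem.Int.bxor ao.1 ao.2)) 15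

-- ===== PRECONDITION & SPEC =====
def Spec_comparePieces (bs : List Int) (out : Int) : Prop := out = comparePieces_alt bs
instance (bs : List Int) (out : Int) : Decidable (Spec_comparePieces bs out) := by unfold Spec_comparePieces; infer_instance

-- ===== CLAIM (what is proved, stated in full; the proofs are below) =====
def Claim_equal_comparePieces : Prop := ∀ (bs : List Int), Dom_comparePieces bs → Spec_comparePieces bs (comparePieces bs)

-- ===== LEMMAS AND PROOFS =====

theorem pvLdiffSub : ∀ n m : Nat, n - (n &&& m) = Nat.ldiff n m := by
  intro n
  induction n using Nat.strong_induction_on with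
  | _ n ih =>
    intro m
    by_cases h0 : n = 0
    · subst h0; simp [Nat.ldiff]
    · have ih2 := ih n.div2 (Nat.binaryRec_decreasing h0) m.div2
      have hle : n.div2 &&& m.div2 ≤ n.div2 := Nat.and_le_left
      conv_lhs => rw [← Nat.bit_bodd_div2 n, ← Nat.bit_bodd_div2 m]
      conv_rhs => rw [← Nat.bit_bodd_div2 n, ← Nat.bit_bodd_div2 m]
      rw [Nat.land_bit, Nat.ldiff_bit, ← ih2]
      simp only [Nat.bit_val]
      cases n.bodd <;> cases m.bodd <;> simp <;> omega

theorem pvNegCast' (k : Nat) : -(k:Int) - 1 = Int.negSucc k := by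
  rw [Int.negSucc_eq]; ring

theorem pvTB_band (a b : Int) (i : Nat) :
    (PySem.Int.band a b).testBit i = (a.testBit i && b.testBit i) := by
  rcases a with n | n <;> rcases b with m | m <;>
    simp [PySem.Int.band, Int.testBit, pvLdiffSub, Nat.testBit_ldiff,
      pvNegCast', Bool.and_comm]

theorem pvTB_bor (a b : Int) (i : Nat) :
    (PySem.Int.bor a b).testBit i = (a.testBit i || b.testBit i) := by
  rcases a with n | n <;> rcases b with m | m <;>
    simp [PySem.Int.bor, Int.testBit, pvLdiffSub, Nat.testBit_ldiff,
      pvNegCast', Bool.or_comm] <;>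
    cases n.testBit i <;> cases m.testBit i <;> simp

theorem pvTB_bxor (a b : Int) (i : Nat) :
    (PySem.Int.bxor a b).testBit i = (a.testBit i ^^ b.testBit i) := by
  rcases a with n | n <;> rcases b with m | m <;>
    simp [PySem.Int.bxor, Int.testBit, pvNegCast', Nat.testBit_xor] <;>
    cases n.testBit i <;> cases m.testBit i <;> simp

theorem pvTB_not (a : Int) (i : Nat) :
    (Int.not a).testBit i = !(a.testBit i) := by
  rcases a with n | n <;> simp [Int.not, Int.testBit]

theorem pvIntExt (a b : Int) (h : ∀ i, a.testBit i = b.testBit i) : a = b := by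
  rcases a with n | n <;> rcases b with m | m
  · exact congrArg Int.ofNat (Nat.eq_of_testBit_eq fun i => by simpa [Int.testBit] using h i)
  · exfalso
    have hi := h (n + m)
    have h1 : n < 2^(n+m) := lt_of_le_of_lt (Nat.le_add_right n m) (Nat.lt_two_pow_self)
    have h2 : m < 2^(n+m) := lt_of_le_of_lt (Nat.le_add_left m n) (Nat.lt_two_pow_self)
    simp [Int.testBit, Nat.testBit_eq_false_of_lt, h1, h2] at hi
  · exfalso
    have hi := h (n + m)
    have h1 : n < 2^(n+m) := lt_of_le_of_lt (Nat.le_add_right n m) (Nat.lt_two_pow_self)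
    have h2 : m < 2^(n+m) := lt_of_le_of_lt (Nat.le_add_left m n) (Nat.lt_two_pow_self)
    simp [Int.testBit, Nat.testBit_eq_false_of_lt, h1, h2] at hi
  · exact congrArg Int.negSucc (Nat.eq_of_testBit_eq fun i => by
      have := h i; simpa [Int.testBit] using this)

theorem pvBandAssoc (a b c : Int) :
    PySem.Int.band (PySem.Int.band a b) c = PySem.Int.band a (PySem.Int.band b c) := by
  apply pvIntExt; intro i
  simp [pvTB_band, Bool.and_assoc]

theorem pvBorAssoc (a b c : Int) :
    PySem.Int.bor (PySem.Int.bor a b) c = PySem.Int.bor a (PySem.Int.bor b c) := by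
  apply pvIntExt; intro i
  simp [pvTB_bor, Bool.or_assoc]

theorem pvMaskIdem (z : Int) :
    PySem.Int.band (PySem.Int.band z 15) 15 = PySem.Int.band z 15 := by
  apply pvIntExt; intro i
  simp [pvTB_band]

theorem pvMask15 (z : Int) :
    PySem.Int.band 15 (PySem.Int.band z 15) = PySem.Int.band z 15 := by
  apply pvIntExt; intro i
  simp only [pvTB_band]
  cases z.testBit i <;> cases (15:Int).testBit i <;> rfl

theorem pvSelfMask (p : Int) :
    PySem.Int.band (Int.not (PySem.Int.bxor p p)) 15 = 15 := by
  rw [PySem.Int.bxor_self]; decide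

theorem pvKey (p b x y : Int) :
    PySem.Int.band (PySem.Int.band (Int.not (PySem.Int.bxor p b)) 15)
      (PySem.Int.band (Int.not (PySem.Int.bxor (PySem.Int.band b x) (PySem.Int.bor b y))) 15)
    = PySem.Int.band (Int.not (PySem.Int.bxor (PySem.Int.band p (PySem.Int.band b x))
        (PySem.Int.bor p (PySem.Int.bor b y)))) 15 := by
  apply pvIntExt; intro i
  simp only [pvTB_band, pvTB_bor, pvTB_bxor, pvTB_not]
  generalize (15:Int).testBit i = M
  cases p.testBit i <;> cases b.testBit i <;> cases x.testBit i <;> cases y.testBit i <;>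
    cases M <;> rfl

theorem pvPairFold (t : List Int) : ∀ a o : Int,
    (t.foldl (fun (ao : Int × Int) b => (PySem.Int.band ao.1 b, PySem.Int.bor ao.2 b)) (a, o))
    = (t.foldl PySem.Int.band a, t.foldl PySem.Int.bor o) := by
  induction t with
  | nil => intro a o; rfl
  | cons c t ih => intro a o; simp only [List.foldl_cons, ih]

theorem pvAndFold (t : List Int) : ∀ p a : Int,
    t.foldl PySem.Int.band (PySem.Int.band p a) = PySem.Int.band p (t.foldl PySem.Int.band a) := by
  induction t with
  | nil => intro p a; rfl
  | cons c t ih => intro p a; simp only [List.foldl_cons, pvBandAssoc, ih]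

theorem pvOrFold (t : List Int) : ∀ p a : Int,
    t.foldl PySem.Int.bor (PySem.Int.bor p a) = PySem.Int.bor p (t.foldl PySem.Int.bor a) := by
  induction t with
  | nil => intro p a; rfl
  | cons c t ih => intro p a; simp only [List.foldl_cons, pvBorAssoc, ih]

theorem pvInv (t : List Int) : ∀ s p : Int, PySem.Int.band s 15 = s →
    (t.foldl (fun (sp : Int × Int) b => (PySem.Int.band sp.1 (pvCompare sp.2 b), b)) (s, p)).1
    = PySem.Int.band s
        (PySem.Int.band (Int.not (PySem.Int.bxor (t.foldl PySem.Int.band p) (t.foldl PySem.Int.bor p))) 15) := by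
  induction t with
  | nil =>
    intro s p h
    simp only [List.foldl_nil, pvSelfMask]
    exact h.symm
  | cons b t ih =>
    intro s p h
    have hC : PySem.Int.band (PySem.Int.band s (pvCompare p b)) 15
        = PySem.Int.band s (pvCompare p b) := by
      unfold pvCompare
      rw [pvBandAssoc, pvMaskIdem]
    simp only [List.foldl_cons]
    rw [ih (PySem.Int.band s (pvCompare p b)) b hC]
    have hA : t.foldl PySem.Int.band b
        = PySem.Int.band b (t.foldl PySem.Int.band (-1)) := by
      rw [← pvAndFold, PySem.Int.band_neg_one]
    have hO : t.foldl PySem.Int.bor b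
        = PySem.Int.bor b (t.foldl PySem.Int.bor 0) := by
      rw [← pvOrFold, PySem.Int.bor_zero]
    have hA2 : t.foldl PySem.Int.band (PySem.Int.band p b)
        = PySem.Int.band p (PySem.Int.band b (t.foldl PySem.Int.band (-1))) := by
      rw [pvAndFold, hA]
    have hO2 : t.foldl PySem.Int.bor (PySem.Int.bor p b)
        = PySem.Int.bor p (PySem.Int.bor b (t.foldl PySem.Int.bor 0)) := by
      rw [pvOrFold, hO]
    rw [hA, hO, hA2, hO2]
    unfold pvCompare
    rw [pvBandAssoc, pvKey]

theorem pvSliceTail (h : Int) (t : List Int) :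
    PySem.List.slice (h :: t) (some 1) none = t := by
  simp [pysem]

-- ===== VERDICT (by name: the statement is the Claim_ definition above) =====
theorem comparePieces_spec : Claim_equal_comparePieces := by
  intro bs _
  unfold Spec_comparePieces
  cases bs with
  | nil => rfl
  | cons h t =>
    show (comparePieces (h :: t)) = comparePieces_alt (h :: t)
    unfold comparePieces comparePieces_alt
    simp only [pvSliceTail, pvPairFold]
    rw [pvInv t 15 h (by decide)]
    exact pvMask15 _
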